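-- pv_equiv track=rewrite | github.com/skyoxu/sanguo | scripts/python/validate_ui_event_source_verification.py | _extract_method_body
-- ===== SOURCE A (Python) =====
-- def _extract_method_body(lines: list[str], sig_index: int) -> tuple[int, int] | None:
--     """
--     Return (start_line_index, end_line_index) inclusive indices in `lines`.
--     Naive brace matching starting from the signature line.
--     """
--     brace = 0
--     started = False
--     start = None
--     for i in range(sig_index, min(len(lines), sig_index + 400)):
--         line = lines[i]
--         if "{" in line:
--             brace += line.count("{")
--             if not started:
--                 started = True
--                 start = i
--         if "}" in line and started:
--             brace -= line.count("}")
--             if brace <= 0 and start is not None: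
--                 return (start, i)
--     return None
-- ===== SOURCE B (Python) =====
-- def _extract_method_body(lines: list[str], sig_index: int) -> tuple[int, int] | None:
--     """Table-based version: precompute per-line brace-count tables for the 400-line
--     window, then select start = first line with an opening brace and
--     end = first line k whose segment net sum(nets[s:k+1]) is non-positive."""
--     idxs = list(range(sig_index, min(len(lines), sig_index + 400)))
--     opens = [lines[i].count("{") for i in idxs]
--     closes = [lines[i].count("}") for i in idxs]
--     starts = [k for k in range(len(idxs)) if opens[k] > 0]
--     if not starts:
--         return None
--     s = starts[0]
--     nets = [o - c for o, c in zip(opens, closes)]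
--     ends = [k for k in range(s, len(idxs)) if sum(nets[s:k + 1]) <= 0]
--     return (idxs[s], idxs[ends[0]]) if ends else None
-- ===== Notes on version B (the rewrite author's own statement) =====
-- stated objective: alternative
-- what changed: A's single stateful scan (running brace counter plus started/start flags) is replaced by a table-based computation: B first builds per-line '{' and '}' count tables for the 400-line window, then selects start as the first table row with an opening brace and end as the first row k whose closed-form segment sum sum(nets[s:k+1]) is non-positive - no running accumulator, selection by filtering index ranges against precomputed tables.
import Mathlib
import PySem

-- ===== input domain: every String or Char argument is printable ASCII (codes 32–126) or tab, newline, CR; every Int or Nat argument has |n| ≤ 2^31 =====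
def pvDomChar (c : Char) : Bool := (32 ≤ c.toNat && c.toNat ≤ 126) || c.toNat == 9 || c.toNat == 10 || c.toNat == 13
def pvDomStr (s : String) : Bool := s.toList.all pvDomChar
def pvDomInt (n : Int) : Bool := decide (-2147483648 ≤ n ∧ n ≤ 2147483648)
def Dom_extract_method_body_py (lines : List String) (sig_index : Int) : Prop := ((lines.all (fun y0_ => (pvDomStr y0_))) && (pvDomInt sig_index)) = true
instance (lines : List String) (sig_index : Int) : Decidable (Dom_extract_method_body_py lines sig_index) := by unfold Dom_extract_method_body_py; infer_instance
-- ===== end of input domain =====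

-- B replaces A's stateful single scan (brace/started/start flags) by a table-based computation:
-- per-line brace-count tables for the window, then start/end selected by closed-form segment-sum
-- conditions over those tables ("alternative"; B re-sums segments, O(W^2) vs A's O(W) over the window).


-- ===== PORT A =====
-- A's for-loop over range(sig_index, min(len(lines), sig_index+400)) with state (brace, started, start);
-- `lines[i]` is PySem.List.pyGet? (none = IndexError, excluded by Pre_, where the loop stops with none).
def extract_method_body_py_loop (lines : List String) : List Int → Int → Bool → Option Int → Option (Int × Int)
  | [], _, _, _ => none
  | i :: rest, brace, started, start =>
    match PySem.List.pyGet? lines i with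
    | none => none
    | some line =>
      -- if "{" in line: brace += line.count("{"); if not started: started = True; start = i
      let st :=
        if PySem.Str.isIn "{" line then
          (brace + (PySem.Str.count line "{" : Int), true, if started then start else some i)
        else (brace, started, start)
      -- if "}" in line and started: brace -= line.count("}"); if brace <= 0 and start is not None: return (start, i)
      if PySem.Str.isIn "}" line && st.2.1 then
        let b2 := st.1 - (PySem.Str.count line "}" : Int)
        if b2 ≤ 0 && st.2.2.isSome then some (st.2.2.getD 0, i)
        else extract_method_body_py_loop lines rest b2 st.2.1 st.2.2
      else extract_method_body_py_loop lines rest st.1 st.2.1 st.2.2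

def extract_method_body_py (lines : List String) (sig_index : Int) : Option (Int × Int) :=
  extract_method_body_py_loop lines
    (PySem.List.pyRange sig_index (min (lines.length : Int) (sig_index + 400)) 1) 0 false none

-- ===== PORT B =====
-- Source B: idxs = list(range(sig_index, min(len(lines), sig_index+400)));
--   opens/closes = per-line brace-count tables (lines[i] = pyGet?, IndexError → none, outside Pre_);
--   starts = [k for k in range(len(idxs)) if opens[k] > 0]  (opens[k]: k < len(opens), so getD is exact);
--   nets = [o - c for o, c in zip(opens, closes)];
--   ends = [k for k in range(s, len(idxs)) if sum(nets[s:k+1]) <= 0]  (0 ≤ s ≤ k: the slice is drop/take);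
--   result (idxs[s], idxs[ends[0]])  (s, ends[0] < len(idxs), so getD is exact).
def extract_method_body_py_alt (lines : List String) (sig_index : Int) : Option (Int × Int) :=
  let idxs := PySem.List.pyRange sig_index (min (lines.length : Int) (sig_index + 400)) 1
  match idxs.mapM (fun i => (PySem.List.pyGet? lines i).map (fun l => PySem.Str.count l "{")) with
  | none => none
  | some opens =>
    match idxs.mapM (fun i => (PySem.List.pyGet? lines i).map (fun l => PySem.Str.count l "}")) with
    | none => none
    | some closes =>
      match ((List.range idxs.length).filter (fun k => decide (0 < opens.getD k 0))).head? with
      | none => none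
      | some s =>
        let nets := List.zipWith (fun (o c : Nat) => (o : Int) - (c : Int)) opens closes
        match ((List.range' s (idxs.length - s)).filter
            (fun k => decide (((nets.drop s).take (k + 1 - s)).sum ≤ 0))).head? with
        | none => none
        | some k => some (idxs.getD s 0, idxs.getD k 0)

-- ===== PRECONDITION & SPEC =====
-- Pre_ excludes exactly the inputs where Python raises IndexError: sig_index < -len(lines) with a
-- non-empty iteration window (both A and B access lines[sig_index] there and raise).
def Pre_extract_method_body_py (lines : List String) (sig_index : Int) : Prop :=
  -(lines.length : Int) ≤ sig_index ∨ (lines.length : Int) ≤ sig_index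
instance (lines : List String) (sig_index : Int) : Decidable (Pre_extract_method_body_py lines sig_index) := by unfold Pre_extract_method_body_py; infer_instance

def pvWitness_extract_method_body_py : List String × Int :=
  (["int f() {", "  return 1;", "}"], 0)

def Spec_extract_method_body_py (lines : List String) (sig_index : Int) (out : Option (Int × Int)) : Prop := out = extract_method_body_py_alt lines sig_index
instance (lines : List String) (sig_index : Int) (out : Option (Int × Int)) : Decidable (Spec_extract_method_body_py lines sig_index out) := by unfold Spec_extract_method_body_py; infer_instance

-- ===== CLAIM (what is proved, stated in full; the proofs are below) =====
def Claim_equal_extract_method_body_py : Prop := ∀ (lines : List String) (sig_index : Int), Dom_extract_method_body_py lines sig_index → Pre_extract_method_body_py lines sig_index → Spec_extract_method_body_py lines sig_index (extract_method_body_py lines sig_index)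

-- ===== LEMMAS AND PROOFS =====

-- the line at index i, total (under Pre_ every access in the window succeeds)
def emb_gl (lines : List String) (i : Int) : String := (PySem.List.pyGet? lines i).getD ""

-- net brace balance of the line at index i
def emb_net (lines : List String) (i : Int) : Int :=
  (PySem.Str.count (emb_gl lines i) "{" : Int) - (PySem.Str.count (emb_gl lines i) "}" : Int)

-- proof-layer intermediate: A's loop split into a find phase and a balance phase
def emb_find (lines : List String) : List Int → Option Int
  | [] => none
  | i :: rest =>
    match PySem.List.pyGet? lines i with
    | none => none
    | some line => if PySem.Str.isIn "{" line then some i else emb_find lines rest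

def emb_bal (lines : List String) (start : Int) : List Int → Int → Option (Int × Int)
  | [], _ => none
  | j :: rest, brace =>
    match PySem.List.pyGet? lines j with
    | none => none
    | some line =>
      let b := brace + (PySem.Str.count line "{" : Int) - (PySem.Str.count line "}" : Int)
      if b ≤ 0 then some (start, j) else emb_bal lines start rest b

-- count of a single-character needle is List.count (count.go consumes one char per step here)
theorem countgo_singleton (c : Char) : ∀ (fuel : Nat) (l : List Char) (acc : Nat),
    l.length ≤ fuel → PySem.Chars.count.go [c] fuel l acc = acc + l.count c := by
  intro fuel
  induction fuel with
  | zero => intro l acc h; cases l with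
    | nil => simp [PySem.Chars.count.go]
    | cons x t => simp at h
  | succ n ih =>
    intro l acc h
    cases l with
    | nil => simp [PySem.Chars.count.go]
    | cons x t =>
      simp only [PySem.Chars.count.go]
      by_cases hx : c = x
      · subst hx
        simp only [List.isPrefixOf, BEq.rfl, Bool.true_and, if_true,
          List.length_singleton, List.drop_succ_cons, List.drop_zero]
        rw [ih t (acc + 1) (by simpa using h)]
        simp
        omega
      · have hpre : List.isPrefixOf [c] (x :: t) = false := by
          simp [List.isPrefixOf, hx]
        rw [hpre]
        simp only [Bool.false_eq_true, if_false]
        rw [ih t acc (by simpa using h)]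
        have hxc : x ≠ c := fun hh => hx hh.symm
        simp [hxc]

theorem count_singleton (l : List Char) (c : Char) : PySem.Chars.count l [c] = l.count c := by
  simp [PySem.Chars.count, countgo_singleton c l.length l 0 le_rfl]

theorem str_isIn_singleton_iff (s : String) (c : Char) :
    PySem.Str.isIn (String.ofList [c]) s = true ↔ c ∈ s.toList := by
  rw [PySem.Str.isIn_iff_infix, String.toList_ofList]
  exact List.singleton_infix_iff c s.toList

theorem str_count_isIn_false {s : String} {c : Char} (h : PySem.Str.isIn (String.ofList [c]) s = false) :
    PySem.Str.count s (String.ofList [c]) = 0 := by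
  rw [PySem.Str.count_eq, String.toList_ofList, count_singleton]
  refine List.count_eq_zero.mpr (fun hc => ?_)
  rw [(str_isIn_singleton_iff s c).mpr hc] at h
  cases h

theorem str_count_isIn_true {s : String} {c : Char} (h : PySem.Str.isIn (String.ofList [c]) s = true) :
    1 ≤ PySem.Str.count s (String.ofList [c]) := by
  rw [PySem.Str.count_eq, String.toList_ofList, count_singleton]
  exact List.one_le_count_iff.mpr ((str_isIn_singleton_iff s c).mp h)

-- '{' membership test as a count condition (stated with the literal "{")
theorem isIn_count_brace (l : String) :
    PySem.Str.isIn "{" l = decide (0 < PySem.Str.count l "{") := by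
  cases h : PySem.Str.isIn "{" l with
  | false =>
    have h0 : PySem.Str.count l "{" = 0 := str_count_isIn_false h
    rw [h0]
    rfl
  | true =>
    have h2 : 0 < PySem.Str.count l "{" := str_count_isIn_true h
    exact (decide_eq_true h2).symm

-- my own find?-congruence on members
theorem find?_congr_mem {α : Type} {p q : α → Bool} : ∀ (l : List α),
    (∀ x ∈ l, p x = q x) → l.find? p = l.find? q := by
  intro l
  induction l with
  | nil => intro _; rfl
  | cons a t ih =>
    intro h
    simp only [List.find?_cons]
    rw [h a (by simp)]
    cases q a
    · simpa using ih (fun x hx => h x (by simp [hx]))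
    · simp

-- zipWith of two maps over the same list is a single map
theorem zipWith_map_same {α β γ δ : Type} (f : β → γ → δ) (g : α → β) (h : α → γ) :
    ∀ l : List α, List.zipWith f (l.map g) (l.map h) = l.map (fun x => f (g x) (h x)) := by
  intro l
  induction l with
  | nil => rfl
  | cons x xs ih => simp [ih]

-- phase 2: once started with positive balance, A's loop is the balance loop
theorem loop_started (lines : List String) : ∀ (r : List Int) (brace : Int) (s : Int),
    0 < brace →
    extract_method_body_py_loop lines r brace true (some s) =
      emb_bal lines s r brace := by
  intro r
  induction r with
  | nil => intro brace s _; rfl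
  | cons i rest ih =>
    intro brace s hb
    simp only [extract_method_body_py_loop, emb_bal]
    cases hg : PySem.List.pyGet? lines i with
    | none => rfl
    | some line =>
      by_cases hO : PySem.Str.isIn "{" line = true
      · by_cases hC : PySem.Str.isIn "}" line = true
        · simp only [hO, hC, if_true, Option.isSome_some, Bool.and_true,
            decide_eq_true_eq, Option.getD_some]
          split_ifs with h
          · rfl
          · exact ih _ s (by omega)
        · have hCf : PySem.Str.isIn "}" line = false := by simpa using hC
          have hc0 : PySem.Str.count line "}" = 0 := str_count_isIn_false hCf
          simp only [hO, hCf, if_true, Bool.false_and, Bool.false_eq_true, if_false, hc0,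
            Nat.cast_zero, sub_zero]
          rw [if_neg (by omega)]
          exact ih _ s (by omega)
      · have hOf : PySem.Str.isIn "{" line = false := by simpa using hO
        have ho0 : PySem.Str.count line "{" = 0 := str_count_isIn_false hOf
        by_cases hC : PySem.Str.isIn "}" line = true
        · simp only [hOf, hC, Bool.false_eq_true, if_false, if_true,
            Option.isSome_some, Bool.and_true, decide_eq_true_eq, Option.getD_some, ho0,
            Nat.cast_zero, add_zero]
          split_ifs with h
          · rfl
          · exact ih _ s (by omega)
        · have hCf : PySem.Str.isIn "}" line = false := by simpa using hC
          have hc0 : PySem.Str.count line "}" = 0 := str_count_isIn_false hCf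
          simp only [hOf, hCf, Bool.false_eq_true, if_false, Bool.false_and, ho0, hc0,
            Nat.cast_zero, add_zero, sub_zero]
          rw [if_neg (by omega)]
          exact ih _ s hb

-- phase 1: before any '{', A's loop is the find phase followed by the balance phase
theorem loop_unstarted (lines : List String) (e : Int) : ∀ (n : Nat) (a : Int), (e - a).toNat ≤ n →
    extract_method_body_py_loop lines (PySem.List.pyRange a e 1) 0 false none =
      (match emb_find lines (PySem.List.pyRange a e 1) with
       | none => none
       | some s => emb_bal lines s (PySem.List.pyRange s e 1) 0) := by
  intro n
  induction n with
  | zero =>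
    intro a h
    rw [PySem.List.pyRange_one_eq_nil (by omega)]
    rfl
  | succ n ih =>
    intro a h
    by_cases hae : a < e
    · rw [PySem.List.pyRange_one_cons hae]
      simp only [extract_method_body_py_loop, emb_find]
      cases hg : PySem.List.pyGet? lines a with
      | none => rfl
      | some line =>
        by_cases hO : PySem.Str.isIn "{" line = true
        · have hp1 : 1 ≤ PySem.Str.count line "{" := str_count_isIn_true hO
          simp only [hO, if_true, Bool.false_eq_true, if_false, zero_add]
          rw [PySem.List.pyRange_one_cons hae]
          simp only [emb_bal, hg, zero_add]
          by_cases hC : PySem.Str.isIn "}" line = true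
          · simp only [hC, if_true, Option.isSome_some, Bool.and_true,
              decide_eq_true_eq, Option.getD_some]
            split_ifs with h1
            · rfl
            · exact loop_started lines _ _ a (by omega)
          · have hCf : PySem.Str.isIn "}" line = false := by simpa using hC
            have hc0 : PySem.Str.count line "}" = 0 := str_count_isIn_false hCf
            simp only [hCf, Bool.false_and, Bool.false_eq_true, if_false, hc0,
              Nat.cast_zero, sub_zero]
            rw [if_neg (by omega)]
            exact loop_started lines _ _ a (by omega)
        · have hOf : PySem.Str.isIn "{" line = false := by simpa using hO
          simp only [hOf, Bool.false_eq_true, if_false, Bool.and_false]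
          exact ih (a + 1) (by omega)
    · rw [PySem.List.pyRange_one_eq_nil (by omega)]
      rfl

-- mapM over Option succeeds and is the map through emb_gl when every access succeeds
theorem emb_mapM_some (lines : List String) (g : String → Nat) : ∀ (L : List Int),
    (∀ i ∈ L, (PySem.List.pyGet? lines i).isSome) →
    L.mapM (fun i => (PySem.List.pyGet? lines i).map g) =
      some (L.map (fun i => g (emb_gl lines i))) := by
  intro L
  induction L with
  | nil => intro _; rfl
  | cons i t ih =>
    intro h
    have hi := h i (by simp)
    cases hg : PySem.List.pyGet? lines i with
    | none => rw [hg] at hi; cases hi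
    | some l =>
      rw [List.mapM_cons, hg, ih (fun j hj => h j (by simp [hj]))]
      simp [emb_gl, hg]

-- the find phase is List.find? over the index list when every access succeeds
theorem emb_find_eq (lines : List String) : ∀ (L : List Int),
    (∀ i ∈ L, (PySem.List.pyGet? lines i).isSome) →
    emb_find lines L = L.find? (fun i => PySem.Str.isIn "{" (emb_gl lines i)) := by
  intro L
  induction L with
  | nil => intro _; rfl
  | cons i t ih =>
    intro h
    have hi := h i (by simp)
    cases hg : PySem.List.pyGet? lines i with
    | none => rw [hg] at hi; cases hi
    | some l =>
      simp only [emb_find, hg, List.find?_cons, emb_gl, Option.getD_some]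
      cases PySem.Str.isIn "{" l
      · simpa using ih (fun j hj => h j (by simp [hj]))
      · rfl

-- the balance phase is the first index whose segment net-sum is non-positive
theorem emb_bal_eq (lines : List String) (a e st : Int)
    (hget : ∀ i : Int, a ≤ i → i < e → (PySem.List.pyGet? lines i).isSome) :
    ∀ (cnt s : Nat) (b : Int), s + cnt = (e - a).toNat →
    emb_bal lines st (PySem.List.pyRange (a + s) e 1) b =
      ((List.range' s cnt).find? (fun k : Nat =>
          decide (b + ((List.range' s (k + 1 - s)).map (fun j : Nat => emb_net lines (a + j))).sum ≤ 0))).map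
        (fun k : Nat => (st, a + (k : Int))) := by
  intro cnt
  induction cnt with
  | zero =>
    intro s b hs
    rw [PySem.List.pyRange_one_eq_nil (by omega)]
    rfl
  | succ cnt ih =>
    intro s b hs
    have hlt : a + (s : Int) < e := by omega
    rw [PySem.List.pyRange_one_cons hlt]
    have hg := hget (a + s) (by omega) hlt
    cases hgl : PySem.List.pyGet? lines (a + s) with
    | none => rw [hgl] at hg; cases hg
    | some l =>
      have hglD : emb_gl lines (a + (s : Int)) = l := by simp [emb_gl, hgl]
      have hnet : emb_net lines (a + (s : Int)) =
          (PySem.Str.count l "{" : Int) - (PySem.Str.count l "}" : Int) := by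
        simp [emb_net, hglD]
      have hself : ∀ b' : Int,
          (decide (b' + ((List.range' s (s + 1 - s)).map (fun j : Nat => emb_net lines (a + j))).sum ≤ 0))
            = decide (b' + (PySem.Str.count l "{" : Int) - (PySem.Str.count l "}" : Int) ≤ 0) := by
        intro b'
        have h1 : s + 1 - s = 1 := by omega
        rw [h1, List.range'_one, List.map_cons, List.map_nil, List.sum_cons, List.sum_nil,
          add_zero, hnet, decide_eq_decide]
        omega
      rw [List.range'_succ]
      simp only [emb_bal, hgl]
      by_cases hb : b + (PySem.Str.count l "{" : Int) - (PySem.Str.count l "}" : Int) ≤ 0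
      · rw [if_pos hb,
          List.find?_cons_of_pos (by
            show (decide (b + ((List.range' s (s + 1 - s)).map
                (fun j : Nat => emb_net lines (a + j))).sum ≤ 0)) = true
            rw [hself b]
            simpa using hb)]
        simp
      · rw [if_neg hb,
          List.find?_cons_of_neg (by
            show ¬ (decide (b + ((List.range' s (s + 1 - s)).map
                (fun j : Nat => emb_net lines (a + j))).sum ≤ 0)) = true
            rw [hself b]
            simpa using hb)]
        have hcast : a + (s : Int) + 1 = a + ((s + 1 : Nat) : Int) := by push_cast; ring
        rw [hcast, ih (s + 1) (b + (PySem.Str.count l "{" : Int) - (PySem.Str.count l "}" : Int)) (by omega)]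
        congr 1
        apply find?_congr_mem
        intro k hk
        have hks : s + 1 ≤ k := (List.mem_range'_1.mp hk).1
        have hsplit : k + 1 - s = (k + 1 - (s + 1)) + 1 := by omega
        conv_rhs => rw [hsplit, List.range'_succ]
        simp only [List.map_cons, List.sum_cons]
        rw [decide_eq_decide, hnet]
        omega

-- take of range' keeps a range'
theorem take_range'_eq : ∀ (c s m : Nat), (List.range' s c).take m = List.range' s (min m c) := by
  intro c
  induction c with
  | zero => intro s m; simp
  | succ c ih =>
    intro s m
    cases m with
    | zero => simp
    | succ m =>
      rw [List.range'_succ, List.take_succ_cons, ih (s + 1) m, Nat.succ_min_succ,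
        List.range'_succ]

-- characterization of port A under total window access: find?/bal over window positions
theorem a_char (lines : List String) (a : Int)
    (hmem : ∀ i ∈ PySem.List.pyRange a (min (lines.length : Int) (a + 400)) 1,
      (PySem.List.pyGet? lines i).isSome) :
    extract_method_body_py lines a =
      (match (List.range ((min (lines.length : Int) (a + 400) - a).toNat)).find?
          (fun k : Nat => decide (0 < PySem.Str.count (emb_gl lines (a + k)) "{")) with
       | none => none
       | some s => emb_bal lines (a + (s : Int))
           (PySem.List.pyRange (a + (s : Int)) (min (lines.length : Int) (a + 400)) 1) 0) := by
  unfold extract_method_body_py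
  rw [loop_unstarted lines (min (lines.length : Int) (a + 400))
      ((min (lines.length : Int) (a + 400) - a).toNat) a le_rfl]
  rw [emb_find_eq lines _ hmem]
  rw [PySem.List.pyRange_one, List.find?_map]
  simp only [Function.comp_def]
  rw [find?_congr_mem
      (p := fun k : Nat => PySem.Str.isIn "{" (emb_gl lines (a + k)))
      (q := fun k : Nat => decide (0 < PySem.Str.count (emb_gl lines (a + k)) "{"))
      (List.range ((min (lines.length : Int) (a + 400) - a).toNat))
      (fun k _ => isIn_count_brace (emb_gl lines (a + k)))]
  cases hF : (List.range ((min (lines.length : Int) (a + 400) - a).toNat)).find?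
      (fun k : Nat => decide (0 < PySem.Str.count (emb_gl lines (a + k)) "{")) with
  | none => simp
  | some s => simp

-- characterization of port B under total window access
theorem alt_char (lines : List String) (a : Int)
    (hmem : ∀ i ∈ PySem.List.pyRange a (min (lines.length : Int) (a + 400)) 1,
      (PySem.List.pyGet? lines i).isSome) :
    extract_method_body_py_alt lines a =
      (match (List.range ((min (lines.length : Int) (a + 400) - a).toNat)).find?
          (fun k : Nat => decide (0 < PySem.Str.count (emb_gl lines (a + k)) "{")) with
       | none => none
       | some s =>
         match (List.range' s ((min (lines.length : Int) (a + 400) - a).toNat - s)).find?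
             (fun k : Nat => decide (((List.range' s (k + 1 - s)).map
                 (fun j : Nat => emb_net lines (a + j))).sum ≤ 0)) with
         | none => none
         | some k => some (a + (s : Int), a + (k : Int))) := by
  have hmapO := emb_mapM_some lines (fun l => PySem.Str.count l "{")
      (PySem.List.pyRange a (min (lines.length : Int) (a + 400)) 1) hmem
  have hmapC := emb_mapM_some lines (fun l => PySem.Str.count l "}")
      (PySem.List.pyRange a (min (lines.length : Int) (a + 400)) 1) hmem
  have hlen : (PySem.List.pyRange a (min (lines.length : Int) (a + 400)) 1).length
      = (min (lines.length : Int) (a + 400) - a).toNat := PySem.List.length_pyRange_one a _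
  have hmap : PySem.List.pyRange a (min (lines.length : Int) (a + 400)) 1
      = (List.range ((min (lines.length : Int) (a + 400) - a).toNat)).map (fun k : Nat => a + (k : Int)) :=
    PySem.List.pyRange_one a _
  have hko : ∀ k ∈ List.range ((min (lines.length : Int) (a + 400) - a).toNat),
      (decide (0 < ((PySem.List.pyRange a (min (lines.length : Int) (a + 400)) 1).map
          (fun i => PySem.Str.count (emb_gl lines i) "{")).getD k 0))
        = decide (0 < PySem.Str.count (emb_gl lines (a + (k : Int))) "{") := by
    intro k hk
    have hkn : k < (min (lines.length : Int) (a + 400) - a).toNat := List.mem_range.mp hk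
    rw [List.getD_eq_getElem?_getD, hmap, List.map_map, List.getElem?_map,
      List.getElem?_range hkn]
    rfl
  unfold extract_method_body_py_alt
  simp only [hmapO, hmapC]
  rw [List.head?_filter, hlen]
  rw [find?_congr_mem
      (p := fun k : Nat => decide (0 < ((PySem.List.pyRange a (min (lines.length : Int) (a + 400)) 1).map
          (fun i => PySem.Str.count (emb_gl lines i) "{")).getD k 0))
      (q := fun k : Nat => decide (0 < PySem.Str.count (emb_gl lines (a + k)) "{"))
      (List.range ((min (lines.length : Int) (a + 400) - a).toNat)) hko]
  cases hF : (List.range ((min (lines.length : Int) (a + 400) - a).toNat)).find?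
      (fun k : Nat => decide (0 < PySem.Str.count (emb_gl lines (a + k)) "{")) with
  | none => rfl
  | some s =>
    have hsn : s < (min (lines.length : Int) (a + 400) - a).toNat :=
      List.mem_range.mp (List.mem_of_find?_eq_some hF)
    have hnets : List.zipWith (fun (o c : Nat) => (o : Int) - (c : Int))
        ((PySem.List.pyRange a (min (lines.length : Int) (a + 400)) 1).map
          (fun i => PySem.Str.count (emb_gl lines i) "{"))
        ((PySem.List.pyRange a (min (lines.length : Int) (a + 400)) 1).map
          (fun i => PySem.Str.count (emb_gl lines i) "}"))
        = (List.range ((min (lines.length : Int) (a + 400) - a).toNat)).map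
            (fun k : Nat => emb_net lines (a + k)) := by
      rw [zipWith_map_same, hmap, List.map_map]
      rfl
    have hke : ∀ k ∈ List.range' s ((min (lines.length : Int) (a + 400) - a).toNat - s),
        (decide ((((((List.range ((min (lines.length : Int) (a + 400) - a).toNat)).map
            (fun k : Nat => emb_net lines (a + k)))).drop s).take (k + 1 - s)).sum ≤ 0))
          = decide (((List.range' s (k + 1 - s)).map
              (fun j : Nat => emb_net lines (a + j))).sum ≤ 0) := by
      intro k hk
      have hkb := List.mem_range'_1.mp hk
      rw [← List.map_drop, ← List.map_take, List.range_eq_range', List.drop_range',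
        take_range'_eq]
      have h1 : min (k + 1 - s) ((min (lines.length : Int) (a + 400) - a).toNat - s) = k + 1 - s := by
        omega
      have h0 : 0 + s * 1 = s := by omega
      rw [h1, h0]
    simp only [List.head?_filter, hnets]
    rw [find?_congr_mem
        (p := fun k : Nat => decide ((((((List.range ((min (lines.length : Int) (a + 400) - a).toNat)).map
            (fun k : Nat => emb_net lines (a + k)))).drop s).take (k + 1 - s)).sum ≤ 0))
        (q := fun k : Nat => decide (((List.range' s (k + 1 - s)).map
            (fun j : Nat => emb_net lines (a + j))).sum ≤ 0))
        (List.range' s ((min (lines.length : Int) (a + 400) - a).toNat - s)) hke]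
    cases hE : (List.range' s ((min (lines.length : Int) (a + 400) - a).toNat - s)).find?
        (fun k : Nat => decide (((List.range' s (k + 1 - s)).map
            (fun j : Nat => emb_net lines (a + j))).sum ≤ 0)) with
    | none => rfl
    | some k =>
      have hkb := List.mem_range'_1.mp (List.mem_of_find?_eq_some hE)
      have hkn : k < (min (lines.length : Int) (a + 400) - a).toNat := by omega
      have hgs : (PySem.List.pyRange a (min (lines.length : Int) (a + 400)) 1).getD s 0
          = a + (s : Int) := by
        rw [List.getD_eq_getElem?_getD, hmap, List.getElem?_map, List.getElem?_range hsn]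
        rfl
      have hgk : (PySem.List.pyRange a (min (lines.length : Int) (a + 400)) 1).getD k 0
          = a + (k : Int) := by
        rw [List.getD_eq_getElem?_getD, hmap, List.getElem?_map, List.getElem?_range hkn]
        rfl
      show some ((PySem.List.pyRange a (min (lines.length : Int) (a + 400)) 1).getD s 0,
            (PySem.List.pyRange a (min (lines.length : Int) (a + 400)) 1).getD k 0)
          = some (a + (s : Int), a + (k : Int))
      rw [hgs, hgk]

-- ===== VERDICT (by name: the statement is the Claim_ definition above) =====
theorem extract_method_body_py_spec : Claim_equal_extract_method_body_py := by
  intro lines a _ hpre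
  unfold Spec_extract_method_body_py
  have hget : ∀ i : Int, a ≤ i → i < min (lines.length : Int) (a + 400) →
      (PySem.List.pyGet? lines i).isSome := by
    intro i h1 h2
    have hi2 : i < (lines.length : Int) := lt_of_lt_of_le h2 (min_le_left _ _)
    rcases hpre with h | h
    · rw [Option.isSome_iff_ne_none]
      intro hnone
      rw [PySem.List.pyGet?_eq_none_iff] at hnone
      exact hnone (by unfold PySem.Raise.InRange; omega)
    · omega
  have hmem : ∀ i ∈ PySem.List.pyRange a (min (lines.length : Int) (a + 400)) 1,
      (PySem.List.pyGet? lines i).isSome := by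
    intro i hi
    have := (PySem.List.mem_pyRange_one).mp hi
    exact hget i this.1 this.2
  rw [a_char lines a hmem, alt_char lines a hmem]
  cases hF : (List.range ((min (lines.length : Int) (a + 400) - a).toNat)).find?
      (fun k : Nat => decide (0 < PySem.Str.count (emb_gl lines (a + k)) "{")) with
  | none => rfl
  | some s =>
    have hbal := emb_bal_eq lines a (min (lines.length : Int) (a + 400)) (a + (s : Int)) hget
        ((min (lines.length : Int) (a + 400) - a).toNat - s) s 0 (by
          have hsn : s < (min (lines.length : Int) (a + 400) - a).toNat :=
            List.mem_range.mp (List.mem_of_find?_eq_some hF)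
          omega)
    have hcz := find?_congr_mem
        (p := fun k : Nat => decide ((0 : Int) + ((List.range' s (k + 1 - s)).map
            (fun j : Nat => emb_net lines (a + j))).sum ≤ 0))
        (q := fun k : Nat => decide (((List.range' s (k + 1 - s)).map
            (fun j : Nat => emb_net lines (a + j))).sum ≤ 0))
        (List.range' s ((min (lines.length : Int) (a + 400) - a).toNat - s))
        (fun k _ => by simp)
    simp only [hbal, hcz]
    cases hE : (List.range' s ((min (lines.length : Int) (a + 400) - a).toNat - s)).find?
        (fun k : Nat => decide (((List.range' s (k + 1 - s)).map
            (fun j : Nat => emb_net lines (a + j))).sum ≤ 0)) with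
    | none => rfl
    | some k => rfl
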